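-- pv_equiv track=rewrite | github.com/James-Ansley/worble | main.py | format_guess
-- ===== SOURCE A (Python) =====
-- from collections import Counter
--
-- GREEN_HIGHLIGHT = '\033[42m'
--
-- YELLOW_HIGHLIGHT = '\033[43m'
--
-- HIGHLIGHT_OFF = '\033[m'
--
-- def correct_chars(word, guess):
--     return [c1 for c1, c2 in zip(word, guess) if c1 == c2]
--
-- def in_word_chars(word: str, guess: str):
--     return (
--             Counter(guess)
--             - (Counter(guess) - Counter(word))
--             - Counter(correct_chars(word, guess))
--     )
--
-- def format_guess(word, guess):
--     correct_chars_ = in_word_chars(word, guess)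
--     guess = list(guess)
--     for i, (c1, c2) in enumerate(zip(word, guess)):
--         if c1 == c2:
--             guess[i] = f'{GREEN_HIGHLIGHT}{c2}{HIGHLIGHT_OFF}'
--         elif correct_chars_[c2] > 0:
--             correct_chars_.subtract(c2)
--             guess[i] = f'{YELLOW_HIGHLIGHT}{c2}{HIGHLIGHT_OFF}'
--     return ''.join(guess)
-- ===== SOURCE B (Python) =====
-- GREEN_HIGHLIGHT = '\033[42m'
--
-- YELLOW_HIGHLIGHT = '\033[43m'
--
-- HIGHLIGHT_OFF = '\033[m'
--
--
-- def format_guess(word, guess):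
--     # Mark by position sets instead of a running budget: per character, the
--     # yellow positions are the first (count-in-word minus greens) non-green
--     # occurrences of that character in the overlapped region.
--     greens = [c1 == c2 for c1, c2 in zip(word, guess)]
--     yellow = set()
--     for c in set(guess[:len(greens)]):
--         budget = sum(1 for ch in word if ch == c) \
--             - sum(1 for g, c2 in zip(greens, guess) if g and c2 == c)
--         candidates = [i for i, (g, c2) in enumerate(zip(greens, guess)) if not g and c2 == c]
--         yellow.update(candidates[:budget])
--     parts = []
--     for i, ch in enumerate(guess):
--         if i < len(greens) and greens[i]:
--             parts.append(GREEN_HIGHLIGHT + ch + HIGHLIGHT_OFF)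
--         elif i in yellow:
--             parts.append(YELLOW_HIGHLIGHT + ch + HIGHLIGHT_OFF)
--         else:
--             parts.append(ch)
--     return ''.join(parts)
-- ===== Notes on version B (the rewrite author's own statement) =====
-- stated objective: alternative
-- what changed: B replaces A's Counter-algebra budget that is consumed while mutating the guess list in place by a position-set algorithm: it precomputes a green boolean mask, then for each distinct guessed character takes the first (occurrences-in-word minus greens) non-green positions of that character as the yellow index set, and finally renders each position by set membership with no mutable budget in the output pass.
import Mathlib
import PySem

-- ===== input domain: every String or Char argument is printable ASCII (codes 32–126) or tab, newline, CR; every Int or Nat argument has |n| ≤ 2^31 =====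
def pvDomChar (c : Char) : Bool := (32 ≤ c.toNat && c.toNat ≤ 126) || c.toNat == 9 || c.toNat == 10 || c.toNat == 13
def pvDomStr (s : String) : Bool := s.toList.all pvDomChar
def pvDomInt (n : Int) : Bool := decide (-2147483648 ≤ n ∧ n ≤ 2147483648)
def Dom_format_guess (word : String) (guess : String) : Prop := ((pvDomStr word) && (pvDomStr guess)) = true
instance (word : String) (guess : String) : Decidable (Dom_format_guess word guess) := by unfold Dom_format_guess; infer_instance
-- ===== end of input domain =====

-- B marks by precomputed position sets (per character, the first budget-many non-green
-- occurrences become yellow) instead of A's Counter algebra consumed during an in-place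
-- mutation of the guess list (objective: alternative).

-- shared string constants (escape sequences, as lists of chars)
def pvGreenH : List Char := [Char.ofNat 27, '[', '4', '2', 'm']
def pvYellowH : List Char := [Char.ofNat 27, '[', '4', '3', 'm']
def pvHOff : List Char := [Char.ofNat 27, '[', 'm']
def pvG (c : Char) : List Char := pvGreenH ++ [c] ++ pvHOff
def pvY (c : Char) : List Char := pvYellowH ++ [c] ++ pvHOff

-- ===== PORT A =====
-- Counter.__sub__ (CPython: keep self's keys whose difference is positive, then other's keys
-- absent from self whose negation is positive), ported exactly on the items lists.
def pvCounterSub (d1 d2 : PySem.Dict Char Int) : PySem.Dict Char Int :=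
  PySem.Dict.mk
    ((d1.items.filterMap (fun p =>
        if 0 < p.2 - d2.getD p.1 0 then some (p.1, p.2 - d2.getD p.1 0) else none)) ++
     (d2.items.filterMap (fun p =>
        if d1.contains p.1 then none
        else if 0 < 0 - p.2 then some (p.1, 0 - p.2) else none)))

def correct_chars (word guess : String) : List Char :=
  ((word.toList.zip guess.toList).filter (fun p => p.1 == p.2)).map (fun p => p.1)

def in_word_chars (word guess : String) : PySem.Dict Char Int :=
  pvCounterSub
    (pvCounterSub (PySem.Dict.counter guess.toList)
      (pvCounterSub (PySem.Dict.counter guess.toList) (PySem.Dict.counter word.toList)))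
    (PySem.Dict.counter (correct_chars word guess))

-- the loop mutates guess[i] only after zip has yielded element i, so the pairs are those of the
-- original strings; 'correct_chars_.subtract(c2)' is modify (the key is present in that branch).
def format_guess (word : String) (guess : String) : String :=
  let cc := in_word_chars word guess
  let g0 : List (List Char) := guess.toList.map (fun c => [c])
  let r :=
    (PySem.List.enumerate (word.toList.zip guess.toList)).foldl
      (fun (st : List (List Char) × PySem.Dict Char Int) ip =>
        if ip.2.1 == ip.2.2 then (st.1.set ip.1.toNat (pvG ip.2.2), st.2)
        else if 0 < st.2.getD ip.2.2 0 then
          (st.1.set ip.1.toNat (pvY ip.2.2), st.2.modify ip.2.2 0 (· - 1))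
        else st)
      (g0, cc)
  String.mk r.1.flatten

-- ===== PORT B =====
-- 'sum(1 for … if …)' is countP; the set comprehension/loop builds a PySem.Set of Int indices;
-- ''.join of the parts list is concatenation of the char chunks.
def format_guess_alt (word : String) (guess : String) : String :=
  let wl := word.toList
  let gl := guess.toList
  let greens : List Bool := (wl.zip gl).map (fun p => p.1 == p.2)
  let yellow : List Int :=
    (PySem.Set.ofList (PySem.List.slice gl none (some (greens.length : Int)))).foldl
      (fun y c =>
        let budget : Int := (wl.countP (fun ch => ch == c) : Int)
          - ((greens.zip gl).countP (fun p => p.1 && p.2 == c) : Int)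
        let candidates : List Int :=
          (PySem.List.enumerate (greens.zip gl)).filterMap
            (fun ip => if !ip.2.1 && ip.2.2 == c then some ip.1 else none)
        PySem.Set.update y (PySem.List.slice candidates none (some budget)))
      PySem.Set.empty
  String.mk ((PySem.List.enumerate gl).map (fun ich =>
      if ich.1 < (greens.length : Int) && (PySem.List.pyGet? greens ich.1).getD false then
        pvG ich.2
      else if PySem.Set.contains yellow ich.1 then pvY ich.2
      else [ich.2])).flatten

-- ===== PRECONDITION & SPEC =====
def Spec_format_guess (word : String) (guess : String) (out : String) : Prop := out = format_guess_alt word guess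
instance (word : String) (guess : String) (out : String) : Decidable (Spec_format_guess word guess out) := by unfold Spec_format_guess; infer_instance

-- ===== CLAIM (what is proved, stated in full; the proofs are below) =====
def Claim_equal_format_guess : Prop := ∀ (word : String) (guess : String), Dom_format_guess word guess → Spec_format_guess word guess (format_guess word guess)

-- ===== LEMMAS AND PROOFS =====

-- A's colouring scan, abstracted over the pair list and the yellow-budget counter
def pvScan : List (Char × Char) → PySem.Dict Char Int → List (List Char)
  | [], _ => []
  | p :: rest, d =>
    if p.1 == p.2 then pvG p.2 :: pvScan rest d
    else if 0 < d.getD p.2 0 then pvY p.2 :: pvScan rest (d.modify p.2 0 (· - 1))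
    else [p.2] :: pvScan rest d

-- how many non-green occurrences of c the scan can still consume
def pvAvail (pairs : List (Char × Char)) (c : Char) : Int :=
  (pairs.countP (fun p => !(p.1 == p.2) && p.2 == c) : Int)

lemma pvAvail_nonneg (pairs : List (Char × Char)) (c : Char) : 0 ≤ pvAvail pairs c := by
  simp [pvAvail]

lemma pvAvail_cons (p : Char × Char) (rest : List (Char × Char)) (c : Char) :
    pvAvail (p :: rest) c =
      pvAvail rest c + (if !(p.1 == p.2) && p.2 == c then 1 else 0) := by
  simp only [pvAvail, List.countP_cons]
  split_ifs <;> push_cast <;> ring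

-- A's output loop is the scan followed by the untouched tail
lemma foldlA_eq_pvScan (pairs : List (Char × Char)) (pre tail : List (List Char))
    (d : PySem.Dict Char Int) :
    ((PySem.List.enumerate pairs (pre.length : Int)).foldl
      (fun (st : List (List Char) × PySem.Dict Char Int) ip =>
        if ip.2.1 == ip.2.2 then (st.1.set ip.1.toNat (pvG ip.2.2), st.2)
        else if 0 < st.2.getD ip.2.2 0 then
          (st.1.set ip.1.toNat (pvY ip.2.2), st.2.modify ip.2.2 0 (· - 1))
        else st)
      (pre ++ (pairs.map (fun p => [p.2]) ++ tail), d)).1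
    = pre ++ (pvScan pairs d ++ tail) := by
  induction pairs generalizing pre d with
  | nil => simp [pvScan, PySem.List.enumerate]
  | cons p ps ih =>
    have hset : ∀ (x : List (List Char)) (y : List Char),
        (pre ++ ([p.2] :: x)).set ((pre.length : Int)).toNat y = (pre ++ [y]) ++ x := by
      intro x y
      rw [List.set_append]
      simp
    have hih : ∀ (y : List Char) (d' : PySem.Dict Char Int),
        ((PySem.List.enumerate ps ((pre.length : Int) + 1)).foldl
          (fun (st : List (List Char) × PySem.Dict Char Int) ip =>
            if ip.2.1 == ip.2.2 then (st.1.set ip.1.toNat (pvG ip.2.2), st.2)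
            else if 0 < st.2.getD ip.2.2 0 then
              (st.1.set ip.1.toNat (pvY ip.2.2), st.2.modify ip.2.2 0 (· - 1))
            else st)
          ((pre ++ [y]) ++ (ps.map (fun p => [p.2]) ++ tail), d')).1
        = (pre ++ [y]) ++ (pvScan ps d' ++ tail) := by
      intro y d'
      have h := ih (pre ++ [y]) d'
      have hlen : (((pre ++ [y]).length : Nat) : Int) = (pre.length : Int) + 1 := by
        simp
      rw [hlen] at h
      exact h
    simp only [PySem.List.enumerate, List.foldl_cons, List.map_cons, List.cons_append, pvScan]
    by_cases h1 : (p.1 == p.2) = true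
    · rw [if_pos h1, if_pos h1, hset, hih]
      simp
    · rw [if_neg h1, if_neg h1]
      by_cases h2 : 0 < d.getD p.2 0
      · rw [if_pos h2, if_pos h2, hset, hih]
        simp
      · rw [if_neg h2, if_neg h2]
        have hkeep : pre ++ ([p.2] :: (ps.map (fun p => [p.2]) ++ tail))
            = (pre ++ [[p.2]]) ++ (ps.map (fun p => [p.2]) ++ tail) := by simp
        rw [hkeep, hih]
        simp

-- the scan only looks at positivity of the budget, which the invariant preserves
lemma pvScan_congr (pairs : List (Char × Char)) (d1 d2 : PySem.Dict Char Int)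
    (h : ∀ c, d1.getD c 0 = d2.getD c 0 ∨
      (pvAvail pairs c ≤ d1.getD c 0 ∧ pvAvail pairs c ≤ d2.getD c 0)) :
    pvScan pairs d1 = pvScan pairs d2 := by
  induction pairs generalizing d1 d2 with
  | nil => rfl
  | cons p ps ih =>
    have hmono : ∀ c, pvAvail ps c ≤ pvAvail (p :: ps) c := by
      intro c; rw [pvAvail_cons]; split_ifs <;> omega
    have hweak : ∀ (e1 e2 : PySem.Dict Char Int),
        (∀ c, e1.getD c 0 = e2.getD c 0 ∨
          (pvAvail (p :: ps) c ≤ e1.getD c 0 ∧ pvAvail (p :: ps) c ≤ e2.getD c 0)) →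
        (∀ c, e1.getD c 0 = e2.getD c 0 ∨
          (pvAvail ps c ≤ e1.getD c 0 ∧ pvAvail ps c ≤ e2.getD c 0)) := by
      intro e1 e2 hh c
      rcases hh c with he | ⟨ha, hb⟩
      · exact Or.inl he
      · exact Or.inr ⟨le_trans (hmono c) ha, le_trans (hmono c) hb⟩
    simp only [pvScan]
    by_cases h1 : (p.1 == p.2) = true
    · rw [if_pos h1, if_pos h1, ih _ _ (hweak _ _ h)]
    · have havp : pvAvail (p :: ps) p.2 = pvAvail ps p.2 + 1 := by
        rw [pvAvail_cons]; simp [h1]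
      have hpos : (0 < d1.getD p.2 0) ↔ (0 < d2.getD p.2 0) := by
        rcases h p.2 with he | ⟨ha, hb⟩
        · rw [he]
        · have h0 := pvAvail_nonneg ps p.2
          constructor <;> intro <;> omega
      rw [if_neg h1, if_neg h1]
      by_cases h2 : 0 < d1.getD p.2 0
      · have h2' : 0 < d2.getD p.2 0 := hpos.mp h2
        rw [if_pos h2, if_pos h2']
        refine congrArg _ (ih _ _ ?_)
        intro c
        by_cases hc : c = p.2
        · subst hc
          rcases h p.2 with he | ⟨ha, hb⟩
          · simp only [PySem.Dict.getD_modify_self]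
            exact Or.inl (by rw [he])
          · simp only [PySem.Dict.getD_modify_self]
            exact Or.inr ⟨by omega, by omega⟩
        · rw [PySem.Dict.getD_modify, PySem.Dict.getD_modify, if_neg hc, if_neg hc]
          rcases h c with he | ⟨ha, hb⟩
          · exact Or.inl he
          · exact Or.inr ⟨le_trans (hmono c) ha, le_trans (hmono c) hb⟩
      · have h2' : ¬ 0 < d2.getD p.2 0 := fun hh => h2 (hpos.mpr hh)
        rw [if_neg h2, if_neg h2']
        exact congrArg _ (ih _ _ (hweak _ _ h))

-- find? over a key-preserving filterMap, when every candidate with the key is dropped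
lemma pvFind_filterMap_none (l : List (Char × Int)) (f : Char × Int → Option (Char × Int))
    (hkey : ∀ p q, f p = some q → q.1 = p.1) (c : Char)
    (hnone : ∀ p ∈ l, p.1 = c → f p = none) :
    (l.filterMap f).find? (fun p => p.1 == c) = none := by
  induction l with
  | nil => rfl
  | cons a l ih =>
    cases hfa : f a with
    | none =>
      simp only [List.filterMap_cons, hfa]
      exact ih (fun p hp => hnone p (List.mem_cons_of_mem a hp))
    | some q =>
      have hq1 : q.1 = a.1 := hkey a q hfa
      have hne : ¬ ((fun (p : Char × Int) => p.1 == c) q) = true := by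
        intro hbe
        have : a.1 = c := by rw [← hq1]; exact beq_iff_eq.mp hbe
        rw [hnone a (List.mem_cons_self) this] at hfa
        simp at hfa
      simp only [List.filterMap_cons, hfa]
      rw [List.find?_cons_of_neg (p := fun p => p.1 == c) (l := List.filterMap f l) hne]
      exact ih (fun p hp => hnone p (List.mem_cons_of_mem a hp))

-- find? over a key-preserving filterMap of a list with distinct keys
lemma pvFind_filterMap_keyed (l : List (Char × Int)) (f : Char × Int → Option (Char × Int))
    (hkey : ∀ p q, f p = some q → q.1 = p.1) (c : Char)
    (hn : (l.map Prod.fst).Nodup) :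
    (l.filterMap f).find? (fun p => p.1 == c) = (l.find? (fun p => p.1 == c)).bind f := by
  induction l with
  | nil => rfl
  | cons a l ih =>
    simp only [List.map_cons, List.nodup_cons] at hn
    by_cases hac : ((fun (p : Char × Int) => p.1 == c) a) = true
    · have hac' : a.1 = c := beq_iff_eq.mp hac
      rw [List.find?_cons_of_pos (p := fun p => p.1 == c) (l := l) hac]
      cases hfa : f a with
      | some q =>
        have hq1 : q.1 = a.1 := hkey a q hfa
        have hqc : ((fun (p : Char × Int) => p.1 == c) q) = true := by
          simpa using (hq1.trans hac' : q.1 = c)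
        simp only [List.filterMap_cons, hfa]
        rw [List.find?_cons_of_pos (p := fun p => p.1 == c) (l := List.filterMap f l) hqc]
        simp [hfa]
      | none =>
        simp only [List.filterMap_cons, hfa, Option.bind_some]
        rw [pvFind_filterMap_none l f hkey c ?_]
        intro p hp hpc
        exfalso
        exact hn.1 (by rw [hac', ← hpc]; exact List.mem_map_of_mem hp)
    · rw [List.find?_cons_of_neg (p := fun p => p.1 == c) (l := l) hac]
      cases hfa : f a with
      | none =>
        simp only [List.filterMap_cons, hfa]
        exact ih hn.2
      | some q =>
        have hq1 : q.1 = a.1 := hkey a q hfa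
        have hqc : ¬ ((fun (p : Char × Int) => p.1 == c) q) = true := by
          simp only [hq1]
          exact hac
        simp only [List.filterMap_cons, hfa]
        rw [List.find?_cons_of_neg (p := fun p => p.1 == c) (l := List.filterMap f l) hqc]
        exact ih hn.2

-- keys of a key-preserving filterMap form a sublist of the original keys
lemma pvMapFst_filterMap_sublist (l : List (Char × Int)) (f : Char × Int → Option (Char × Int))
    (hkey : ∀ p q, f p = some q → q.1 = p.1) :
    ((l.filterMap f).map Prod.fst).Sublist (l.map Prod.fst) := by
  induction l with
  | nil => simp
  | cons a l ih =>
    rw [List.filterMap_cons]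
    cases hfa : f a with
    | none =>
      simp only [List.map_cons]
      exact ih.trans (List.sublist_cons_self _ _)
    | some q =>
      have hq1 : q.1 = a.1 := hkey a q hfa
      simp only [List.map_cons, hq1]
      exact ih.cons₂ a.1

def pvF1 (d2 : PySem.Dict Char Int) : Char × Int → Option (Char × Int) := fun p =>
  if 0 < p.2 - d2.getD p.1 0 then some (p.1, p.2 - d2.getD p.1 0) else none

def pvF2 (d1 : PySem.Dict Char Int) : Char × Int → Option (Char × Int) := fun p =>
  if d1.contains p.1 then none
  else if 0 < 0 - p.2 then some (p.1, 0 - p.2) else none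

lemma pvF1_key (d2 : PySem.Dict Char Int) : ∀ p q, pvF1 d2 p = some q → q.1 = p.1 := by
  intro p q h
  unfold pvF1 at h
  split at h
  · exact (Option.some_inj.mp h) ▸ rfl
  · simp at h

lemma pvF2_key (d1 : PySem.Dict Char Int) : ∀ p q, pvF2 d1 p = some q → q.1 = p.1 := by
  intro p q h
  unfold pvF2 at h
  split at h
  · simp at h
  · split at h
    · exact (Option.some_inj.mp h) ▸ rfl
    · simp at h

lemma pvCounterSub_items (d1 d2 : PySem.Dict Char Int) :
    (pvCounterSub d1 d2).items = d1.items.filterMap (pvF1 d2) ++ d2.items.filterMap (pvF2 d1) := rfl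

lemma pvNodup_keys_counterSub (d1 d2 : PySem.Dict Char Int)
    (h1 : d1.keys.Nodup) (h2 : d2.keys.Nodup) :
    (pvCounterSub d1 d2).keys.Nodup := by
  have hk : (pvCounterSub d1 d2).keys
      = (d1.items.filterMap (pvF1 d2)).map Prod.fst ++ (d2.items.filterMap (pvF2 d1)).map Prod.fst := by
    simp [PySem.Dict.keys, pvCounterSub_items]
  rw [hk]
  refine List.Nodup.append ?_ ?_ ?_
  · exact ((pvMapFst_filterMap_sublist _ _ (pvF1_key d2)).nodup) h1
  · exact ((pvMapFst_filterMap_sublist _ _ (pvF2_key d1)).nodup) h2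
  · intro x hx1 hx2
    have hmem : x ∈ d1.keys := by
      have := (pvMapFst_filterMap_sublist d1.items (pvF1 d2) (pvF1_key d2)).mem hx1
      exact this
    rcases List.mem_map.mp hx2 with ⟨q, hq, hq1⟩
    rcases List.mem_filterMap.mp hq with ⟨p, hp, hfp⟩
    have hq1p : q.1 = p.1 := pvF2_key d1 p q hfp
    have hcont : d1.contains p.1 = false := by
      unfold pvF2 at hfp
      by_cases hb : d1.contains p.1 = true
      · rw [if_pos hb] at hfp; simp at hfp
      · simp only [Bool.not_eq_true] at hb; exact hb
    have : d1.contains p.1 = true := (PySem.Dict.contains_iff_mem_keys d1 p.1).mpr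
      (by rw [← hq1p, hq1]; exact hmem)
    rw [hcont] at this
    exact Bool.noConfusion this

lemma pvGetD_eq_find? (d : PySem.Dict Char Int) (c : Char) :
    d.getD c 0 = ((d.items.find? (fun p => p.1 == c)).map Prod.snd).getD 0 := by
  simp [PySem.Dict.getD, PySem.Dict.get?]

lemma pvGetD_counterSub (d1 d2 : PySem.Dict Char Int) (c : Char)
    (h1 : d1.keys.Nodup) (h2 : d2.keys.Nodup) (hc2 : 0 ≤ d2.getD c 0) :
    (pvCounterSub d1 d2).getD c 0 = max 0 (d1.getD c 0 - d2.getD c 0) := by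
  rw [pvGetD_eq_find?, pvCounterSub_items, List.find?_append,
    pvFind_filterMap_keyed _ _ (pvF1_key d2) c (by simpa [PySem.Dict.keys] using h1)]
  cases hfind : d1.items.find? (fun p => p.1 == c) with
  | some q =>
    obtain ⟨q1, q2⟩ := q
    have hq1 : q1 = c := by
      have := List.find?_some hfind
      simpa using this
    subst hq1
    have hv : d1.getD q1 0 = q2 :=
      PySem.Dict.getD_of_mem_items d1 (List.mem_of_find?_eq_some hfind) h1 0
    have hcont : d1.contains q1 = true := by
      rw [PySem.Dict.contains_iff_mem_keys]
      simp only [PySem.Dict.keys]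
      exact List.mem_map_of_mem (List.mem_of_find?_eq_some hfind)
    simp only [Option.bind_some]
    by_cases hpos : 0 < q2 - d2.getD q1 0
    · rw [show (pvF1 d2) (q1, q2) = some (q1, q2 - d2.getD q1 0) from if_pos hpos]
      simp [hv]
      omega
    · rw [show (pvF1 d2) (q1, q2) = none from if_neg hpos]
      rw [show (d2.items.filterMap (pvF2 d1)).find? (fun p => p.1 == q1) = none from
        pvFind_filterMap_none _ _ (pvF2_key d1) q1 (by
          intro p hp hpc
          unfold pvF2
          rw [if_pos (hpc ▸ hcont)])]
      simp [hv]
      omega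
  | none =>
    have hnotmem : c ∉ d1.keys := by
      intro hmem
      simp only [PySem.Dict.keys] at hmem
      rcases List.mem_map.mp hmem with ⟨p, hp, hp1⟩
      have := List.find?_eq_none.mp hfind p hp
      exact this (beq_iff_eq.mpr hp1)
    have hd1 : d1.getD c 0 = 0 := by
      rw [pvGetD_eq_find?, hfind]
      rfl
    rw [show (d2.items.filterMap (pvF2 d1)).find? (fun p => p.1 == c) = none from
      pvFind_filterMap_none _ _ (pvF2_key d1) c (by
        intro p hp hpc
        unfold pvF2
        by_cases hcont : d1.contains p.1 = true
        · rw [if_pos hcont]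
        · rw [if_neg hcont, if_neg]
          have : d2.getD c 0 = p.2 :=
            PySem.Dict.getD_of_mem_items d2 (by rw [← hpc]; exact (Prod.mk.eta ▸ hp)) h2 0
          omega)]
    rw [hd1]
    simp
    omega

-- B's green pass subtracts the per-letter green count
lemma pvGetD_greens_pass (l : List (Char × Char)) (d : PySem.Dict Char Int) (c : Char) :
    (l.foldl (fun d p => if p.1 == p.2 then d.modify p.1 0 (· - 1) else d) d).getD c 0
      = d.getD c 0 - (l.countP (fun p => p.1 == p.2 && p.1 == c) : Int) := by
  induction l generalizing d with
  | nil => simp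
  | cons p l ih =>
    rw [List.foldl_cons, List.countP_cons]
    by_cases h1 : (p.1 == p.2) = true
    · rw [if_pos h1, ih, PySem.Dict.getD_modify]
      by_cases hc : c = p.1
      · subst hc
        simp [h1]
        ring
      · rw [if_neg hc]
        have : (p.1 == p.2 && p.1 == c) = false := by
          simp only [Bool.and_eq_false_iff]
          right
          exact beq_eq_false_iff_ne.mpr (fun h => hc h.symm)
        simp [this]
    · rw [if_neg h1, ih]
      have : (p.1 == p.2 && p.1 == c) = false := by
        simp only [Bool.and_eq_false_iff]
        left
        exact Bool.not_eq_true _ ▸ h1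
      simp [this]

-- counting facts about the zipped pairs
lemma pvCountP_snd_zip_le (w g : List Char) (c : Char) :
    (w.zip g).countP (fun p => p.2 == c) ≤ g.count c := by
  induction w generalizing g with
  | nil => simp
  | cons a w ih =>
    cases g with
    | nil => simp
    | cons b g =>
      rw [List.zip_cons_cons, List.countP_cons, List.count_cons]
      have := ih g
      by_cases hb : (b == c) = true <;> simp [hb] <;> omega

lemma pvCountP_fst_zip_le (w g : List Char) (c : Char) :
    (w.zip g).countP (fun p => p.1 == c) ≤ w.count c := by
  induction w generalizing g with
  | nil => simp
  | cons a w ih =>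
    cases g with
    | nil => simp
    | cons b g =>
      rw [List.zip_cons_cons, List.countP_cons, List.count_cons]
      have := ih g
      by_cases ha : (a == c) = true <;> simp [ha] <;> omega

lemma pvCountP_split (l : List (Char × Char)) (c : Char) :
    l.countP (fun p => p.2 == c)
      = l.countP (fun p => p.1 == p.2 && p.2 == c)
        + l.countP (fun p => !(p.1 == p.2) && p.2 == c) := by
  induction l with
  | nil => simp
  | cons p l ih =>
    simp only [List.countP_cons, ih]
    by_cases h1 : (p.1 == p.2) = true <;> by_cases h2 : (p.2 == c) = true <;>
      simp [h1, h2] <;> omega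

lemma pvCountP_green_fst_snd (l : List (Char × Char)) (c : Char) :
    l.countP (fun p => p.1 == p.2 && p.2 == c) = l.countP (fun p => p.1 == p.2 && p.1 == c) := by
  induction l with
  | nil => rfl
  | cons p l ih =>
    simp only [List.countP_cons, ih]
    by_cases h1 : (p.1 == p.2) = true
    · have : p.1 = p.2 := beq_iff_eq.mp h1
      rw [this]
    · simp [h1]

-- A's count of correct chars, as a countP over the pairs
lemma pvCount_correct_chars (word guess : String) (c : Char) :
    (correct_chars word guess).count c
      = (word.toList.zip guess.toList).countP (fun p => p.1 == p.2 && p.1 == c) := by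
  unfold correct_chars
  rw [List.count_eq_countP, List.countP_map, List.countP_filter]
  apply List.countP_congr
  intro p _
  by_cases h1 : (p.1 == p.2) = true <;> by_cases h2 : (p.1 == c) = true <;>
    simp [Function.comp, h1, h2]

-- A's initial budgets and the greens-pass budgets satisfy the scan invariant
lemma pvInvariant (word guess : String) (c : Char) :
    (in_word_chars word guess).getD c 0
        = ((word.toList.zip guess.toList).foldl
            (fun d p => if p.1 == p.2 then d.modify p.1 0 (· - 1) else d)
            (PySem.Dict.counter word.toList)).getD c 0
      ∨ (pvAvail (word.toList.zip guess.toList) c ≤ (in_word_chars word guess).getD c 0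
        ∧ pvAvail (word.toList.zip guess.toList) c
            ≤ ((word.toList.zip guess.toList).foldl
                (fun d p => if p.1 == p.2 then d.modify p.1 0 (· - 1) else d)
                (PySem.Dict.counter word.toList)).getD c 0) := by
  have hn1 : (PySem.Dict.counter guess.toList).keys.Nodup := PySem.Dict.nodup_keys_counter _
  have hn2 : (PySem.Dict.counter word.toList).keys.Nodup := PySem.Dict.nodup_keys_counter _
  have hn3 : (PySem.Dict.counter (correct_chars word guess)).keys.Nodup :=
    PySem.Dict.nodup_keys_counter _
  have ht1 : ∀ x, (pvCounterSub (PySem.Dict.counter guess.toList)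
      (PySem.Dict.counter word.toList)).getD x 0
      = max 0 ((guess.toList.count x : Int) - (word.toList.count x : Int)) := by
    intro x
    rw [pvGetD_counterSub _ _ x hn1 hn2 (by rw [PySem.Dict.getD_counter]; positivity),
      PySem.Dict.getD_counter, PySem.Dict.getD_counter]
  have ht2 : ∀ x, (pvCounterSub (PySem.Dict.counter guess.toList)
      (pvCounterSub (PySem.Dict.counter guess.toList) (PySem.Dict.counter word.toList))).getD x 0
      = max 0 ((guess.toList.count x : Int)
          - max 0 ((guess.toList.count x : Int) - (word.toList.count x : Int))) := by
    intro x
    rw [pvGetD_counterSub _ _ x hn1 (pvNodup_keys_counterSub _ _ hn1 hn2)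
      (by rw [ht1]; positivity), PySem.Dict.getD_counter, ht1]
  have hA : (in_word_chars word guess).getD c 0
      = max 0 (max 0 ((guess.toList.count c : Int)
          - max 0 ((guess.toList.count c : Int) - (word.toList.count c : Int)))
        - (correct_chars word guess).count c) := by
    unfold in_word_chars
    rw [pvGetD_counterSub _ _ c (pvNodup_keys_counterSub _ _ hn1
        (pvNodup_keys_counterSub _ _ hn1 hn2)) hn3
      (by rw [PySem.Dict.getD_counter]; positivity), ht2, PySem.Dict.getD_counter]
  have hB : ((word.toList.zip guess.toList).foldl
      (fun d p => if p.1 == p.2 then d.modify p.1 0 (· - 1) else d)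
      (PySem.Dict.counter word.toList)).getD c 0
      = (word.toList.count c : Int)
        - ((word.toList.zip guess.toList).countP (fun p => p.1 == p.2 && p.1 == c) : Int) := by
    rw [pvGetD_greens_pass, PySem.Dict.getD_counter]
  rw [hA, hB, pvCount_correct_chars]
  have hf1 := pvCountP_snd_zip_le word.toList guess.toList c
  have hf2 := pvCountP_fst_zip_le word.toList guess.toList c
  have hf3 := pvCountP_split (word.toList.zip guess.toList) c
  have hf4 := pvCountP_green_fst_snd (word.toList.zip guess.toList) c
  have hf5 : (word.toList.zip guess.toList).countP (fun p => p.1 == p.2 && p.1 == c)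
      ≤ word.toList.count c := by
    refine le_trans (le_trans ?_ (pvCountP_fst_zip_le word.toList guess.toList c)) le_rfl
    apply List.countP_mono_left
    intro x _ hx
    exact (Bool.and_eq_true_iff.mp hx).2
  unfold pvAvail
  by_cases hcase : (word.toList.count c : Int) ≤ (guess.toList.count c : Int)
  · left
    omega
  · right
    constructor <;> omega

-- the untouched singleton tail of the guess
lemma pvSplit_map_singleton (w g : List Char) :
    g.map (fun c => [c])
      = (w.zip g).map (fun p => [p.2]) ++ (g.drop (w.zip g).length).map (fun c => [c]) := by
  induction w generalizing g with
  | nil => simp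
  | cons a w ih =>
    cases g with
    | nil => simp
    | cons b g =>
      rw [List.zip_cons_cons]
      simp only [List.map_cons, List.length_cons, List.drop_succ_cons, List.cons_append]
      exact congrArg _ (ih g)

-- ===== new lemmas for B =====

lemma pvScan_length (l : List (Char × Char)) (d : PySem.Dict Char Int) :
    (pvScan l d).length = l.length := by
  induction l generalizing d with
  | nil => rfl
  | cons p ps ih =>
    simp only [pvScan]
    split_ifs <;> simp [ih]

-- the i-th chunk of the scan, phrased with the ORIGINAL budgets and the rank of i
lemma pvScan_getElem? (l : List (Char × Char)) (d : PySem.Dict Char Int) (i : Nat)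
    (h : i < l.length) :
    (pvScan l d)[i]? = some (
      if l[i].1 == l[i].2 then pvG l[i].2
      else if (((l.take i).countP (fun p => !(p.1 == p.2) && p.2 == l[i].2)) : Int)
          < d.getD l[i].2 0 then pvY l[i].2
      else [l[i].2]) := by
  induction l generalizing d i with
  | nil => simp at h
  | cons p ps ih =>
    rw [show pvScan (p :: ps) d = (if p.1 == p.2 then pvG p.2 :: pvScan ps d
      else if 0 < d.getD p.2 0 then pvY p.2 :: pvScan ps (d.modify p.2 0 (· - 1))
      else [p.2] :: pvScan ps d) from rfl]
    cases i with
    | zero =>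
      simp only [List.getElem_cons_zero, List.take_zero, List.countP_nil,
        Nat.cast_zero]
      split_ifs with h1 h2' <;> simp_all
    | succ i =>
      have hi : i < ps.length := Nat.lt_of_succ_lt_succ h
      simp only [List.getElem_cons_succ, List.take_succ_cons, List.countP_cons]
      by_cases h1 : (p.1 == p.2) = true
      · rw [if_pos h1]
        have hpred : (!(p.1 == p.2) && p.2 == ps[i].2) = false := by simp [h1]
        rw [List.getElem?_cons_succ, ih d i hi]
        simp [hpred]
      · rw [if_neg h1]
        by_cases h2' : 0 < d.getD p.2 0
        · rw [if_pos h2', List.getElem?_cons_succ, ih (d.modify p.2 0 (· - 1)) i hi]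
          by_cases hca : ps[i].2 = p.2
          · have hpred : (!(p.1 == p.2) && p.2 == ps[i].2) = true := by simp [h1, hca]
            rw [hpred, hca, PySem.Dict.getD_modify_self]
            refine congrArg some ?_
            by_cases hg : (ps[i].1 == p.2) = true
            · rw [if_pos hg, if_pos hg]
            · rw [if_neg hg, if_neg hg]
              by_cases hlt : ((List.countP (fun p_1 => !(p_1.1 == p_1.2) && p_1.2 == p.2)
                  (List.take i ps) : Nat) : Int) < d.getD p.2 0 - 1
              · rw [if_pos hlt, if_pos (by simp only [if_pos rfl]; push_cast; omega)]
              · rw [if_neg hlt, if_neg (by simp only [if_pos rfl]; push_cast; omega)]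
          · have hpred : (!(p.1 == p.2) && p.2 == ps[i].2) = false := by
              simp [beq_eq_false_iff_ne]
              intro _
              exact fun hh => hca hh.symm
            rw [hpred, PySem.Dict.getD_modify, if_neg hca]
            simp
        · rw [if_neg h2', List.getElem?_cons_succ, ih d i hi]
          by_cases hca : ps[i].2 = p.2
          · have hpred : (!(p.1 == p.2) && p.2 == ps[i].2) = true := by simp [h1, hca]
            rw [hpred, hca]
            refine congrArg some ?_
            by_cases hg : (ps[i].1 == p.2) = true
            · rw [if_pos hg, if_pos hg]
            · rw [if_neg hg, if_neg hg]
              rw [if_neg (by omega),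
                if_neg (by simp only [if_pos rfl]; push_cast; omega)]
          · have hpred : (!(p.1 == p.2) && p.2 == ps[i].2) = false := by
              simp [beq_eq_false_iff_ne]
              intro _
              exact fun hh => hca hh.symm
            rw [hpred]
            simp

-- B's greens list zipped back with the guess carries (green?, guessed char)
lemma pvGreens_zip (wl gl : List Char) :
    ((wl.zip gl).map (fun p => p.1 == p.2)).zip gl
      = (wl.zip gl).map (fun p => ((p.1 == p.2 : Bool), p.2)) := by
  induction wl generalizing gl with
  | nil => simp
  | cons a wl ih =>
    cases gl with
    | nil => simp
    | cons b gl => simp [ih]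

-- the candidate indices for character c, as naturals
def pvCandN : List (Bool × Char) → Char → List Nat
  | [], _ => []
  | q :: l, c =>
    if !q.1 && q.2 == c then 0 :: (pvCandN l c).map (· + 1) else (pvCandN l c).map (· + 1)

lemma pvCand_eq (l : List (Bool × Char)) (c : Char) (s : Int) :
    (PySem.List.enumerate l s).filterMap
        (fun ip => if !ip.2.1 && ip.2.2 == c then some ip.1 else none)
      = (pvCandN l c).map (fun (k : Nat) => s + (k : Int)) := by
  induction l generalizing s with
  | nil => simp [PySem.List.enumerate, pvCandN]
  | cons q l ih =>
    have hfun : ((fun (k : Nat) => s + (k : Int)) ∘ fun x => x + 1)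
        = fun (k : Nat) => s + 1 + (k : Int) := by
      funext k
      simp only [Function.comp]
      push_cast
      ring
    rw [PySem.List.enumerate_cons, pvCandN]
    by_cases hq : (!q.1 && q.2 == c) = true
    · have hf : (fun (ip : Int × (Bool × Char)) =>
          if !ip.2.1 && ip.2.2 == c then some ip.1 else none) (s, q) = some s := by
        simp [hq]
      rw [if_pos hq]
      simp only [List.filterMap_cons, hf, ih (s + 1), List.map_cons, List.map_map, hfun]
      simp
    · have hf : (fun (ip : Int × (Bool × Char)) =>
          if !ip.2.1 && ip.2.2 == c then some ip.1 else none) (s, q) = none := by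
        simp [hq]
      rw [if_neg hq]
      simp only [List.filterMap_cons, hf, ih (s + 1), List.map_map, hfun]

lemma pvMem_take_candN (c : Char) (l : List (Bool × Char)) (m k : Nat) :
    k ∈ (pvCandN l c).take m ↔
      ∃ h : k < l.length, l[k].1 = false ∧ l[k].2 = c
        ∧ (l.take k).countP (fun q => !q.1 && q.2 == c) < m := by
  induction l generalizing m k with
  | nil => simp [pvCandN]
  | cons q l ih =>
    rw [pvCandN]
    by_cases hq : (!q.1 && q.2 == c) = true
    · have hq1 : q.1 = false := by
        rcases Bool.and_eq_true_iff.mp hq with ⟨h1, _⟩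
        simpa using h1
      have hq2 : q.2 = c := by
        rcases Bool.and_eq_true_iff.mp hq with ⟨_, h2⟩
        exact beq_iff_eq.mp h2
      rw [if_pos hq]
      cases m with
      | zero => simp
      | succ m =>
        rw [List.take_succ_cons]
        cases k with
        | zero =>
          simp only [List.mem_cons, List.length_cons, List.getElem_cons_zero]
          constructor
          · intro _
            exact ⟨Nat.succ_pos _, hq1, hq2, by simp⟩
          · intro _
            left
            trivial
        | succ k =>
          have hmap : (k + 1 ∈ ((pvCandN l c).map (· + 1)).take m) ↔ k ∈ (pvCandN l c).take m := by
            rw [← List.map_take]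
            simp only [List.mem_map]
            constructor
            · rintro ⟨x, hx, e⟩
              have hxk : x = k := by omega
              exact hxk ▸ hx
            · intro h
              exact ⟨k, h, rfl⟩
          simp only [List.mem_cons, Nat.succ_ne_zero, hmap, false_or,
            List.length_cons, List.getElem_cons_succ, List.take_succ_cons,
            List.countP_cons, hq]
          rw [ih]
          constructor
          · rintro ⟨h, h1, h2, h3⟩
            exact ⟨Nat.succ_lt_succ h, h1, h2, by simpa using Nat.add_lt_add_right h3 1⟩
          · rintro ⟨h, h1, h2, h3⟩
            refine ⟨Nat.lt_of_succ_lt_succ h, h1, h2, ?_⟩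
            simp at h3
            omega
    · rw [if_neg hq]
      cases k with
      | zero =>
        simp only [← List.map_take, List.mem_map]
        constructor
        · rintro ⟨x, _, hx⟩; omega
        · rintro ⟨h, h1, h2, _⟩
          exfalso
          rw [List.getElem_cons_zero] at h1 h2
          apply hq
          simp [h1, h2]
      | succ k =>
        have hmap : (k + 1 ∈ ((pvCandN l c).map (· + 1)).take m) ↔ k ∈ (pvCandN l c).take m := by
          rw [← List.map_take]
          simp only [List.mem_map]
          constructor
          · rintro ⟨x, hx, e⟩
            have hxk : x = k := by omega
            exact hxk ▸ hx
          · intro h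
            exact ⟨k, h, rfl⟩
        rw [hmap, ih]
        simp only [List.length_cons, List.getElem_cons_succ, List.take_succ_cons,
          List.countP_cons, hq]
        constructor
        · rintro ⟨h, h1, h2, h3⟩
          exact ⟨Nat.succ_lt_succ h, h1, h2, by simpa using h3⟩
        · rintro ⟨h, h1, h2, h3⟩
          refine ⟨Nat.lt_of_succ_lt_succ h, h1, h2, ?_⟩
          simpa using h3

lemma pvMem_update (s xs : List Int) (x : Int) :
    x ∈ PySem.Set.update s xs ↔ x ∈ s ∨ x ∈ xs := by
  rw [PySem.Set.update_eq_append_filter]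
  simp only [List.mem_append, List.mem_filter, PySem.Set.mem_ofList,
    PySem.Set.contains_eq_listContains]
  by_cases hx : x ∈ s <;> simp [hx]

lemma pvMem_foldl_update (cs : List Char) (f : Char → List Int) (s0 : List Int) (x : Int) :
    x ∈ cs.foldl (fun y c => PySem.Set.update y (f c)) s0 ↔ x ∈ s0 ∨ ∃ c ∈ cs, x ∈ f c := by
  induction cs generalizing s0 with
  | nil => simp
  | cons c cs ih =>
    rw [List.foldl_cons, ih, pvMem_update]
    simp only [List.mem_cons]
    constructor
    · rintro ((h | h) | ⟨c', hc', h⟩)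
      · exact Or.inl h
      · exact Or.inr ⟨c, Or.inl rfl, h⟩
      · exact Or.inr ⟨c', Or.inr hc', h⟩
    · rintro (h | ⟨c', (rfl | hc'), h⟩)
      · exact Or.inl (Or.inl h)
      · exact Or.inl (Or.inr h)
      · exact Or.inr ⟨c', hc', h⟩

-- the greens-pass budget dictionary B consults, and B's yellow index set in normal form
def pvDG (wl gl : List Char) : PySem.Dict Char Int :=
  (wl.zip gl).foldl (fun d p => if p.1 == p.2 then d.modify p.1 0 (· - 1) else d)
    (PySem.Dict.counter wl)

def pvQairs (wl gl : List Char) : List (Bool × Char) :=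
  (wl.zip gl).map (fun p => ((p.1 == p.2 : Bool), p.2))

def pvYellowSet (wl gl : List Char) : List Int :=
  (PySem.Set.ofList (gl.take (wl.zip gl).length)).foldl
    (fun y c => PySem.Set.update y
      (((pvCandN (pvQairs wl gl) c).map (fun (k : Nat) => (k : Int))).take
        ((pvDG wl gl).getD c 0).toNat))
    PySem.Set.empty

lemma pvDG_getD (wl gl : List Char) (c : Char) :
    (pvDG wl gl).getD c 0
      = (wl.count c : Int) - ((wl.zip gl).countP (fun p => p.1 == p.2 && p.1 == c) : Int) := by
  unfold pvDG
  rw [pvGetD_greens_pass, PySem.Dict.getD_counter]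

lemma pvDG_nonneg (wl gl : List Char) (c : Char) : 0 ≤ (pvDG wl gl).getD c 0 := by
  rw [pvDG_getD]
  have h5 : (wl.zip gl).countP (fun p => p.1 == p.2 && p.1 == c) ≤ wl.count c := by
    refine le_trans ?_ (pvCountP_fst_zip_le wl gl c)
    apply List.countP_mono_left
    intro x _ hx
    exact (Bool.and_eq_true_iff.mp hx).2
  omega

lemma pvSlice_to_getD (l : List Int) (wl gl : List Char) (c : Char) :
    PySem.List.slice l none (some ((pvDG wl gl).getD c 0))
      = l.take ((pvDG wl gl).getD c 0).toNat :=
  PySem.List.slice_to l (pvDG_nonneg wl gl c)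

lemma pvYmem (wl gl : List Char) (x : Int) :
    x ∈ pvYellowSet wl gl ↔
      ∃ c ∈ gl.take (wl.zip gl).length, ∃ k : Nat,
        k ∈ (pvCandN (pvQairs wl gl) c).take ((pvDG wl gl).getD c 0).toNat ∧ (k : Int) = x := by
  unfold pvYellowSet
  rw [pvMem_foldl_update]
  simp only [PySem.Set.mem_ofList, ← List.map_take, List.mem_map]
  constructor
  · rintro (h | ⟨c, hc, k, hk, he⟩)
    · simp [PySem.Set.empty] at h
    · exact ⟨c, hc, k, hk, he⟩
  · rintro ⟨c, hc, k, hk, he⟩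
    exact Or.inr ⟨c, hc, k, hk, he⟩

lemma pvY_bound (wl gl : List Char) (x : Int) (hx : x ∈ pvYellowSet wl gl) :
    ∃ k : Nat, (k : Int) = x ∧ k < (wl.zip gl).length := by
  rcases (pvYmem wl gl x).mp hx with ⟨c, _, k, hk, he⟩
  rcases (pvMem_take_candN c _ _ k).mp hk with ⟨h, _⟩
  refine ⟨k, he, ?_⟩
  simpa [pvQairs] using h

lemma pvCount_qairs (wl gl : List Char) (i : Nat) (c : Char) :
    ((pvQairs wl gl).take i).countP (fun q => !q.1 && q.2 == c)
      = ((wl.zip gl).take i).countP (fun p => !(p.1 == p.2) && p.2 == c) := by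
  unfold pvQairs
  rw [← List.map_take, List.countP_map]
  rfl

-- the core of B: the marking map over the index sets IS the sequential scan plus the plain tail
lemma pvAltB_core (wl gl : List Char) :
    (PySem.List.enumerate gl).map (fun ich =>
      if ich.1 < (((wl.zip gl).length : Nat) : Int)
          && (PySem.List.pyGet? ((wl.zip gl).map (fun p => p.1 == p.2)) ich.1).getD false then
        pvG ich.2
      else if PySem.Set.contains (pvYellowSet wl gl) ich.1 then pvY ich.2
      else [ich.2])
    = pvScan (wl.zip gl) (pvDG wl gl)
      ++ (gl.drop (wl.zip gl).length).map (fun c => [c]) := by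
  have hnle : (wl.zip gl).length ≤ gl.length := by simp [List.length_zip]
  have htlen : (gl.take (wl.zip gl).length).length = (wl.zip gl).length := by
    simp [List.length_take]
  have hsplit : PySem.List.enumerate gl
      = PySem.List.enumerate (gl.take (wl.zip gl).length)
        ++ PySem.List.enumerate (gl.drop (wl.zip gl).length)
          (0 + ((gl.take (wl.zip gl).length).length : Int)) := by
    conv_lhs => rw [← List.take_append_drop (wl.zip gl).length gl]
    exact PySem.List.enumerate_append _ _ _
  rw [hsplit, List.map_append]
  congr 1
  -- the overlapped region: element-wise equality with the scan
  · apply List.ext_getElem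
    · simp [pvScan_length, PySem.List.length_enumerate]
    · intro i h1 h2
      have hi : i < (wl.zip gl).length := by
        rw [pvScan_length] at h2
        exact h2
      have higl : i < gl.length := lt_of_lt_of_le hi hnle
      have hval : (pvScan (wl.zip gl) (pvDG wl gl))[i] =
          (if (wl.zip gl)[i].1 == (wl.zip gl)[i].2 then pvG (wl.zip gl)[i].2
          else if ((((wl.zip gl).take i).countP
              (fun p => !(p.1 == p.2) && p.2 == (wl.zip gl)[i].2)) : Int)
              < (pvDG wl gl).getD (wl.zip gl)[i].2 0 then pvY (wl.zip gl)[i].2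
          else [(wl.zip gl)[i].2]) := by
        have hs := pvScan_getElem? (wl.zip gl) (pvDG wl gl) i hi
        rw [List.getElem?_eq_getElem h2] at hs
        exact Option.some.inj hs
      rw [List.getElem_map, hval]
      have hitl : i < (gl.take (wl.zip gl).length).length := by
        rw [htlen]
        exact hi
      have hele : (PySem.List.enumerate (gl.take (wl.zip gl).length))[i]'(by
            rw [PySem.List.length_enumerate]
            exact hitl)
          = ((0 : Int) + (i : Int), (gl.take (wl.zip gl).length)[i]'hitl) := by
        simp [PySem.List.getElem_enumerate]
      rw [hele]
      have hgete : (gl.take (wl.zip gl).length)[i]'hitl = gl[i] :=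
        List.getElem_take
      have hz : (wl.zip gl)[i] = (wl[i]'(by simp [List.length_zip] at hi; omega), gl[i]) :=
        List.getElem_zip
      have hguard : ((0 : Int) + (i : Int)
            < (((wl.zip gl).length : Nat) : Int)) = True := by
        simp only [zero_add, eq_iff_iff, iff_true]
        exact_mod_cast hi
      have hget? : PySem.List.pyGet? ((wl.zip gl).map (fun p => p.1 == p.2))
            ((0 : Int) + (i : Int))
          = some ((wl.zip gl)[i].1 == (wl.zip gl)[i].2) := by
        rw [zero_add, PySem.List.pyGet?_natCast,
          List.getElem?_eq_getElem (by simpa using hi)]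
        simp
      by_cases hg : ((wl.zip gl)[i].1 == (wl.zip gl)[i].2) = true
      · rw [if_pos hg]
        simp only [hgete, hget?, hguard, decide_true, Option.getD_some, hg, Bool.and_true]
        rw [if_pos (by simp)]
        rw [hz]
      · rw [if_neg hg]
        simp only [hgete, hget?, hguard, decide_true, Option.getD_some, Bool.true_and]
        rw [if_neg (by simpa using hg)]
        -- yellow membership at index i with character gl[i]
        have hqe : (pvQairs wl gl)[i]'(by simpa [pvQairs] using hi)
            = (((wl.zip gl)[i].1 == (wl.zip gl)[i].2 : Bool), (wl.zip gl)[i].2) := by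
          simp [pvQairs]
        have hcnt := pvCount_qairs wl gl i ((wl.zip gl)[i].2)
        have hmemc : gl[i] ∈ gl.take (wl.zip gl).length := by
          rw [← hgete]
          exact List.getElem_mem _
        have hsnd : (wl.zip gl)[i].2 = gl[i] := by rw [hz]
        have hcontains : PySem.Set.contains (pvYellowSet wl gl) ((0 : Int) + (i : Int)) = true
            ↔ ((((wl.zip gl).take i).countP
                (fun p => !(p.1 == p.2) && p.2 == (wl.zip gl)[i].2)) : Int)
              < (pvDG wl gl).getD (wl.zip gl)[i].2 0 := by
          rw [zero_add, PySem.Set.contains_iff, pvYmem]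
          constructor
          · rintro ⟨c, hc, k, hk, he⟩
            have hki : k = i := by exact_mod_cast he
            subst hki
            rcases (pvMem_take_candN c _ _ k).mp hk with ⟨hlt, hq1, hq2, hcount⟩
            have hc2 : c = (wl.zip gl)[k].2 := by rw [← hq2, hqe]
            subst hc2
            rw [hcnt] at hcount
            have hpos := pvDG_nonneg wl gl (wl.zip gl)[k].2
            omega
          · intro hlt
            refine ⟨gl[i], hmemc, i, ?_, rfl⟩
            rw [pvMem_take_candN]
            refine ⟨by simpa [pvQairs] using hi, ?_, ?_, ?_⟩
            · rw [hqe]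
              simpa using hg
            · rw [hqe]
              exact hsnd
            · rw [← hsnd, hcnt]
              have := pvDG_nonneg wl gl (wl.zip gl)[i].2
              omega
        by_cases hyl : ((((wl.zip gl).take i).countP
            (fun p => !(p.1 == p.2) && p.2 == (wl.zip gl)[i].2)) : Int)
            < (pvDG wl gl).getD (wl.zip gl)[i].2 0
        · rw [if_pos hyl, if_pos (hcontains.mpr hyl), hsnd]
        · rw [if_neg hyl, if_neg (by
            intro hcon
            exact hyl (hcontains.mp hcon)), hsnd]
  -- the tail beyond the overlap is printed plainly
  · have hplain : ∀ p ∈ PySem.List.enumerate (gl.drop (wl.zip gl).length)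
        (0 + ((gl.take (wl.zip gl).length).length : Int)),
        (if p.1 < (((wl.zip gl).length : Nat) : Int)
            && (PySem.List.pyGet? ((wl.zip gl).map (fun q => q.1 == q.2)) p.1).getD false then
          pvG p.2
        else if PySem.Set.contains (pvYellowSet wl gl) p.1 then pvY p.2
        else [p.2]) = [p.2] := by
      intro p hp
      rcases (PySem.List.mem_enumerate_iff _ _ _).mp hp with ⟨k, hk, hpk⟩
      have hp1 : p.1 = ((wl.zip gl).length : Int) + (k : Int) := by
        rw [hpk]
        simp
      have hdec : decide (p.1 < (((wl.zip gl).length : Nat) : Int)) = false := by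
        simp only [decide_eq_false_iff_not, hp1, not_lt]
        omega
      have hcont : PySem.Set.contains (pvYellowSet wl gl) p.1 = false := by
        by_contra hcon
        have hmem : p.1 ∈ pvYellowSet wl gl := by
          rw [← PySem.Set.contains_iff]
          revert hcon
          cases PySem.Set.contains (pvYellowSet wl gl) p.1 <;> simp
        rcases pvY_bound wl gl p.1 hmem with ⟨k', he, hk'⟩
        rw [hp1] at he
        omega
      rw [hdec]
      simp only [Bool.false_and]
      rw [if_neg (by simp), hcont, if_neg (by simp)]
    rw [List.map_congr_left hplain]
    have : (fun (p : Int × Char) => [p.2]) = (fun c => [c]) ∘ (fun (p : Int × Char) => p.2) := rfl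
    rw [this, ← List.map_map, PySem.List.map_snd_enumerate]

-- B's port term, normalized to the core shape
lemma pvAltB (word guess : String) :
    format_guess_alt word guess
      = String.mk ((pvScan (word.toList.zip guess.toList) (pvDG word.toList guess.toList)
          ++ (guess.toList.drop (word.toList.zip guess.toList).length).map
            (fun c => [c])).flatten) := by
  unfold format_guess_alt
  dsimp only
  refine congrArg String.mk (congrArg List.flatten ?_)
  have hbud : ∀ c : Char,
      ((word.toList.countP (fun ch => ch == c) : Nat) : Int)
        - ((((word.toList.zip guess.toList).map
            (fun p => ((p.1 == p.2 : Bool), p.2))).countP (fun p => p.1 && p.2 == c) : Nat) : Int)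
      = (pvDG word.toList guess.toList).getD c 0 := by
    intro c
    rw [pvDG_getD]
    have h1 : ((word.toList.zip guess.toList).map
          (fun p => ((p.1 == p.2 : Bool), p.2))).countP (fun p => p.1 && p.2 == c)
        = (word.toList.zip guess.toList).countP (fun p => (p.1 == p.2) && p.2 == c) := by
      rw [List.countP_map]
      rfl
    rw [h1, pvCountP_green_fst_snd]
    have h2 : word.toList.count c = word.toList.countP (fun ch => ch == c) :=
      List.count_eq_countP
    rw [h2]
  rw [pvGreens_zip]
  simp only [pvCand_eq, zero_add, hbud, pvSlice_to_getD, List.length_map]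
  rw [PySem.List.slice_to_natCast]
  exact pvAltB_core word.toList guess.toList

-- ===== VERDICT (by name: the statement is the Claim_ definition above) =====
theorem format_guess_spec : Claim_equal_format_guess := by
  intro word guess _
  show format_guess word guess = format_guess_alt word guess
  rw [pvAltB]
  unfold format_guess
  dsimp only
  have hA := foldlA_eq_pvScan (word.toList.zip guess.toList) []
    ((guess.toList.drop (word.toList.zip guess.toList).length).map (fun c => [c]))
    (in_word_chars word guess)
  rw [List.nil_append, ← pvSplit_map_singleton word.toList guess.toList] at hA
  simp only [List.length_nil, Nat.cast_zero] at hA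
  rw [hA]
  rw [pvScan_congr (word.toList.zip guess.toList) (in_word_chars word guess)
    (pvDG word.toList guess.toList) (fun c => pvInvariant word guess c)]
  rfl
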